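-- pv_equiv track=rewrite | github.com/lslaz1/karl | karl/views/api.py | actions_to_menu
-- ===== SOURCE A (Python) =====
-- def actions_to_menu(actions):
--     """A helper used by the snippets rendering the actions menu.
--
--     This method converts the flat list of action tuples,
--     passed in as input parameters, into a structured list.
--
--     From this input::
--
--         (
--             ('Manage Members', 'manage.html'),
--             ('Add Folder', 'add_folder.html'),
--             ('Add File', 'add_file.html'),
--             ('Add Forum', 'add_forum.html'),
--         )
--
--     it will generate a submenu structure::
--
--         (
--             ('Manage Members', 'manage.html'),
--             ('Add', '#', (
--                     ('Folder', 'add_folder.html'),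
--                     ('File', 'add_file.html'),
--                     ('Forum', 'add_forum.html'),
--                 )
--         )
--
--     but if there are only 2 or less groupable items, the menu
--     stays flat and a submenu is not created.
--
--     At the moment, there is no information marking the Add
--     items. Therefore the following heuristics is applied:
--
--     - if a title starts with Add, it is considered as Add item
--
--     - the rest of the title is considered the content type.
--
--
--     XXX p.s. according to this heuristics, the following will
--     also be detected as an Add item::
--
--        ('Add Existing', 'add_existing.html')
--
--     Which won't be a problem if there is no more then 3 Add
--     items altogether.
--     """
--     result = []
--     lookahead = []
--     def process_lookahead(result=result, lookahead=lookahead):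
--         if len(lookahead) > 2:
--             # Convert to submenu
--             # take part after "Add " as title.
--             result.append(('Add', '#', [(item[0][4:], item[1]) for item in lookahead]))  # noqa
--         else:
--             # add to menu as flat
--             result.extend(lookahead)
--         # We processed it
--         del lookahead[:]
--
--     for action in actions:
--         # Is this a menu action?
--         is_menu_action = action[0].startswith('Add ')
--         # pad them out to make sure template does not fail
--         action = action + ((), )
--         if is_menu_action:
--             lookahead.append(action)
--         else:
--             # process lookahead
--             process_lookahead()
--             result.append(action)
--     process_lookahead()
--     return result
-- ===== SOURCE B (Python) =====
-- def actions_to_menu(actions):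
--     # Scan run by run: peel off the maximal leading run of actions sharing the
--     # same "is an Add item" key, render it (submenu for an Add-run longer than
--     # 2, flat padded items otherwise), and continue with the remainder.
--     result = []
--     rest = list(actions)
--     while rest:
--         k = rest[0][0].startswith('Add ')
--         j = 1
--         while j < len(rest) and rest[j][0].startswith('Add ') == k:
--             j += 1
--         run, rest = rest[:j], rest[j:]
--         if k and len(run) > 2:
--             result.append(('Add', '#', [(t[4:], u) for t, u in run]))
--         else:
--             result.extend(a + ((),) for a in run)
--     return result
-- ===== Notes on version B (the rewrite author's own statement) =====
-- stated objective: alternative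
-- what changed: Replaces A's streaming loop with a mutable lookahead buffer and a nested flushing closure by a run-at-a-time scan: peel off each maximal consecutive run sharing the startswith('Add ') key and render it directly (submenu if an Add-run longer than 2, flat padded items otherwise).
import Mathlib
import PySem

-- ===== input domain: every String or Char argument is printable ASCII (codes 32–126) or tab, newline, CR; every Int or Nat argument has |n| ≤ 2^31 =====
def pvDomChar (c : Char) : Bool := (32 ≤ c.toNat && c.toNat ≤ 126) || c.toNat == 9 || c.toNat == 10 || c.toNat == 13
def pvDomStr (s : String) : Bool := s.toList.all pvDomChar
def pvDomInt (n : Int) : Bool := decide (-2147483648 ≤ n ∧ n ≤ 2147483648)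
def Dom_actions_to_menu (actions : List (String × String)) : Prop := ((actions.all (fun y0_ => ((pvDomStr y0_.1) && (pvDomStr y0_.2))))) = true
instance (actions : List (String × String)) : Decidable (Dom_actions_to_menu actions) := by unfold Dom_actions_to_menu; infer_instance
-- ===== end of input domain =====

-- B replaces A's streaming loop with a lookahead buffer and a flushing closure
-- by a run-at-a-time scan (peel off each maximal consecutive run of the
-- startswith('Add ') key and render it directly); objective: alternative
-- decomposition, same cost.

-- ===== PORT A =====

-- action + ((),) : pad a pair out to a triple with an empty submenu
def pvPad (a : String × String) : String × String × (List (String × String)) := (a.1, a.2, [])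

-- the nested closure process_lookahead (it reads/extends result, clears lookahead)
-- item[0][4:] is exact as String.mk (toList.drop 4): Python s[4:] never raises
def pvProcessLookahead (result : List (String × String × (List (String × String))))
    (lookahead : List (String × String × (List (String × String)))) :
    List (String × String × (List (String × String))) :=
  if lookahead.length > 2 then
    result ++ [("Add", "#", lookahead.map (fun item => (String.mk (item.1.toList.drop 4), item.2.1)))]
  else
    result ++ lookahead

-- one iteration of A's for-loop over (result, lookahead)
def pvStepA (st : List (String × String × (List (String × String))) × List (String × String × (List (String × String))))
    (action : String × String) :
    List (String × String × (List (String × String))) × List (String × String × (List (String × String))) :=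
  let is_menu_action := PySem.Str.startswith action.1 "Add "
  let a := pvPad action
  if is_menu_action then (st.1, st.2 ++ [a])
  else (pvProcessLookahead st.1 st.2 ++ [a], [])

def actions_to_menu (actions : List (String × String)) : List (String × String × (List (String × String))) :=
  let st := actions.foldl pvStepA ([], [])
  pvProcessLookahead st.1 st.2

-- ===== PORT B =====

def pvKey (a : String × String) : Bool := PySem.Str.startswith a.1 "Add "

-- render one maximal run (submenu for an Add-run longer than 2, flat padded otherwise)
def pvRender (k : Bool) (run : List (String × String)) : List (String × String × (List (String × String))) :=
  if k && decide (run.length > 2) then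
    [("Add", "#", run.map (fun p => (String.mk (p.1.toList.drop 4), p.2)))]
  else
    run.map pvPad

def actions_to_menu_alt : List (String × String) → List (String × String × (List (String × String)))
  | [] => []
  | x :: xs =>
    let k := pvKey x
    pvRender k (x :: xs.takeWhile (fun y => pvKey y == k)) ++
      actions_to_menu_alt (xs.dropWhile (fun y => pvKey y == k))
termination_by l => l.length
decreasing_by
  simpa using Nat.lt_succ_of_le (List.length_dropWhile_le _ _)

-- ===== PRECONDITION & SPEC =====
def Spec_actions_to_menu (actions : List (String × String)) (out : List (String × String × (List (String × String)))) : Prop := out = actions_to_menu_alt actions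
instance (actions : List (String × String)) (out : List (String × String × (List (String × String)))) : Decidable (Spec_actions_to_menu actions out) := by unfold Spec_actions_to_menu; infer_instance

-- ===== CLAIM (what is proved, stated in full; the proofs are below) =====
def Claim_equal_actions_to_menu : Prop := ∀ (actions : List (String × String)), Dom_actions_to_menu actions → Spec_actions_to_menu actions (actions_to_menu actions)

-- ===== LEMMAS AND PROOFS =====

-- flushing an empty lookahead is a no-op
theorem procLA_nil (res : List (String × String × (List (String × String)))) :
    pvProcessLookahead res [] = res := by
  simp [pvProcessLookahead]

-- a run of non-Add actions is appended one by one, lookahead stays empty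
theorem foldl_nonadd (run : List (String × String))
    (h : ∀ y ∈ run, pvKey y = false)
    (res : List (String × String × (List (String × String)))) :
    run.foldl pvStepA (res, []) = (res ++ run.map pvPad, []) := by
  induction run generalizing res with
  | nil => simp
  | cons y ys ih =>
    have hy : pvKey y = false := h y (by simp)
    simp only [List.foldl_cons, pvStepA, pvKey] at hy ⊢
    rw [hy]
    simp only [Bool.false_eq_true, if_false, procLA_nil]
    rw [ih (fun z hz => h z (by simp [hz]))]
    simp

-- a run of Add actions only accumulates into the lookahead
theorem foldl_add (run : List (String × String))
    (h : ∀ y ∈ run, pvKey y = true)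
    (res la : List (String × String × (List (String × String)))) :
    run.foldl pvStepA (res, la) = (res, la ++ run.map pvPad) := by
  induction run generalizing la with
  | nil => simp
  | cons y ys ih =>
    have hy : pvKey y = true := h y (by simp)
    simp only [List.foldl_cons, pvStepA, pvKey] at hy ⊢
    rw [hy]
    simp only [if_true]
    rw [ih (fun z hz => h z (by simp [hz]))]
    simp

-- flushing a padded Add-run equals rendering that run
theorem procLA_render (run : List (String × String))
    (res : List (String × String × (List (String × String)))) :
    pvProcessLookahead res (run.map pvPad) = res ++ pvRender true run := by
  by_cases hlen : run.length > 2
  · simp [pvProcessLookahead, pvRender, hlen, pvPad, Function.comp]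
  · simp [pvProcessLookahead, pvRender, hlen]

-- when the next action is non-Add, the pending lookahead may be flushed first
theorem foldl_flush_first (ys : List (String × String)) (y : String × String)
    (hy : pvKey y = false)
    (res la : List (String × String × (List (String × String)))) :
    (y :: ys).foldl pvStepA (res, la) = (y :: ys).foldl pvStepA (pvProcessLookahead res la, []) := by
  simp only [List.foldl_cons, pvStepA, pvKey] at hy ⊢
  rw [hy]
  simp [procLA_nil]

-- the head of dropWhile falsifies the predicate
theorem key_head_dropWhile (xs : List (String × String)) (p : String × String → Bool)
    (y : String × String) (ys : List (String × String))
    (h : xs.dropWhile p = y :: ys) : p y = false := by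
  induction xs with
  | nil => simp at h
  | cons a as ih =>
    rw [List.dropWhile_cons] at h
    split at h
    · exact ih h
    · rename_i ha
      cases h
      simpa using ha

-- unfolding lemmas for B's run recursion
theorem alt_nil : actions_to_menu_alt [] = [] := by
  rw [actions_to_menu_alt]

theorem alt_cons (x : String × String) (xs : List (String × String)) :
    actions_to_menu_alt (x :: xs) =
      pvRender (pvKey x) (x :: xs.takeWhile (fun y => pvKey y == pvKey x)) ++
        actions_to_menu_alt (xs.dropWhile (fun y => pvKey y == pvKey x)) := by
  rw [actions_to_menu_alt]

-- main invariant: running A's loop from (res, []) and flushing appends B's output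
theorem main_inv (n : Nat) :
    ∀ actions : List (String × String), actions.length ≤ n →
    ∀ res : List (String × String × (List (String × String))),
      pvProcessLookahead (actions.foldl pvStepA (res, [])).1 (actions.foldl pvStepA (res, [])).2
        = res ++ actions_to_menu_alt actions := by
  induction n with
  | zero =>
    intro actions hlen res
    rw [List.length_eq_zero_iff.mp (Nat.le_zero.mp hlen)]
    simp [procLA_nil, alt_nil]
  | succ n ihn =>
    intro actions hlen res
    cases actions with
    | nil => simp [procLA_nil, alt_nil]
    | cons x xs =>
      rw [alt_cons]
      cases hkv : pvKey x with
      | false =>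
        have hsplit : x :: xs =
            (x :: xs.takeWhile (fun y => pvKey y == false)) ++ xs.dropWhile (fun y => pvKey y == false) := by
          simp [List.takeWhile_append_dropWhile]
        conv_lhs => rw [hsplit]
        rw [List.foldl_append]
        rw [foldl_nonadd (x :: xs.takeWhile (fun y => pvKey y == false))
          (fun y hy => by
            rcases List.mem_cons.mp hy with h | h
            · exact h ▸ hkv
            · simpa using List.mem_takeWhile_imp h) res]
        rw [ihn _ (le_trans (List.length_dropWhile_le _ _) (Nat.le_of_succ_le_succ hlen))]
        have hr : pvRender false (x :: xs.takeWhile (fun y => pvKey y == false))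
            = (x :: xs.takeWhile (fun y => pvKey y == false)).map pvPad := by
          simp [pvRender]
        rw [hr, List.append_assoc]
      | true =>
        have hsplit : x :: xs =
            (x :: xs.takeWhile (fun y => pvKey y == true)) ++ xs.dropWhile (fun y => pvKey y == true) := by
          simp [List.takeWhile_append_dropWhile]
        conv_lhs => rw [hsplit]
        rw [List.foldl_append]
        rw [foldl_add (x :: xs.takeWhile (fun y => pvKey y == true))
          (fun y hy => by
            rcases List.mem_cons.mp hy with h | h
            · exact h ▸ hkv
            · simpa using List.mem_takeWhile_imp h) res []]
        simp only [List.nil_append]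
        cases hrest : xs.dropWhile (fun y => pvKey y == true) with
        | nil =>
          simp only [List.foldl_nil]
          rw [procLA_render, alt_nil, List.append_nil]
        | cons y ys =>
          have hy : pvKey y = false := by
            have := key_head_dropWhile xs (fun y => pvKey y == true) y ys hrest
            simpa using this
          rw [foldl_flush_first ys y hy res _, procLA_render, ← hrest]
          rw [ihn _ (le_trans (List.length_dropWhile_le _ _) (Nat.le_of_succ_le_succ hlen))]
          rw [List.append_assoc]

-- ===== VERDICT (by name: the statement is the Claim_ definition above) =====
theorem actions_to_menu_spec : Claim_equal_actions_to_menu := by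
  intro actions _
  show pvProcessLookahead (actions.foldl pvStepA ([], [])).1 (actions.foldl pvStepA ([], [])).2
    = actions_to_menu_alt actions
  exact (main_inv actions.length actions le_rfl []).trans (List.nil_append _)
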